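-- pv_equiv track=rewrite | github.com/codio-content/book-converter | converter/toc.py | cleanup_name
-- ===== SOURCE A (Python) =====
-- def cleanup_name(name):
--     l_pos = name.find('{')
--     r_pos = name.find('}')
--     cut_pos = l_pos + 1
--     if l_pos != -1 and r_pos != -1 and l_pos < r_pos:
--         if name[l_pos + 1] == '\\':
--             cut_pos = name.find(' ', l_pos)
--         else:
--             for pos in range(l_pos, -1, -1):
--                 if name[pos] == '\\':
--                     l_pos = pos + 1
--                     break
--         if l_pos != 0:
--             l_pos = l_pos - 1
--         else:
--             cut_pos += 1
--         res = name[0:l_pos] + name[cut_pos:r_pos] + name[r_pos + 1:]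
--         return cleanup_name(res)
--     return name
-- ===== SOURCE B (Python) =====
-- def cleanup_name(name):
--     while True:
--         l = name.find('{')
--         r = name.find('}')
--         if l == -1 or r == -1 or r <= l:
--             return name
--         if name[l + 1] == '\\':
--             sp = name.find(' ', l)
--             keep, cut = (l - 1, sp) if l else (0, sp + 1)
--         else:
--             p = name.rfind('\\', 0, l)
--             if p != -1:
--                 keep, cut = p, l + 1
--             elif l:
--                 keep, cut = l - 1, l + 1
--             else:
--                 keep, cut = 0, l + 2
--         name = name[:keep] + name[cut:r] + name[r + 1:]
-- ===== Notes on version B (the rewrite author's own statement) =====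
-- stated objective: simpler
-- what changed: B replaces A's tail recursion by an explicit while-loop and replaces A's backward character-scanning for-loop (with break and leftover-state adjustment) by a single str.rfind call that yields the keep/cut bounds directly.
import Mathlib
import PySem

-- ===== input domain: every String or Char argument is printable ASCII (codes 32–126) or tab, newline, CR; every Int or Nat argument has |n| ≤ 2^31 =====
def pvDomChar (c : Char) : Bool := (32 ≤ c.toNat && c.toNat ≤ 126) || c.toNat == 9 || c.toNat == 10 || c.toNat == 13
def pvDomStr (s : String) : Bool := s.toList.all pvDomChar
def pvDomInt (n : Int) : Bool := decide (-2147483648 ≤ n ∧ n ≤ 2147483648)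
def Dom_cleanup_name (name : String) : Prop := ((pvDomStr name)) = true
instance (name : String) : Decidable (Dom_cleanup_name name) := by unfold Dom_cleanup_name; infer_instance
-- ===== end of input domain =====

-- B rewrites A's tail recursion as an explicit while-loop and replaces A's backward
-- character-scanning for-loop by a single str.rfind call (objective: simpler/idiomatic).

-- ===== PORT A =====
-- A's inner `for pos in range(l_pos, -1, -1): if name[pos] == '\\': l_pos = pos + 1; break`
def cleanup_scanA (s : List Char) (l : Int) : Nat → Int
  | 0 => if PySem.Chars.pyGet? s ((0 : Nat) : Int) = some '\\' then 1 else l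
  | p + 1 => if PySem.Chars.pyGet? s (((p + 1 : Nat)) : Int) = some '\\' then ((p : Int) + 1) + 1
             else cleanup_scanA s l p
-- A's recursion, made total with fuel (one unit per recursive call; each call strictly
-- shortens the string, so `length + 1` units always suffice).
def cleanup_goA (fuel : Nat) (name : List Char) : List Char :=
  match fuel with
  | 0 => name
  | fuel + 1 =>
    let l_pos := PySem.Chars.find name ['{']
    let r_pos := PySem.Chars.find name ['}']
    let cut_pos := l_pos + 1
    if l_pos ≠ -1 ∧ r_pos ≠ -1 ∧ l_pos < r_pos then
      let lc :=
        if PySem.Chars.pyGet? name (l_pos + 1) = some '\\' then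
          (l_pos, PySem.Chars.findFrom name [' '] l_pos none)
        else
          (cleanup_scanA name l_pos l_pos.toNat, cut_pos)
      let lc2 := if lc.1 ≠ 0 then (lc.1 - 1, lc.2) else (lc.1, lc.2 + 1)
      let res := PySem.Chars.slice name (some 0) (some lc2.1) ++
                 PySem.Chars.slice name (some lc2.2) (some r_pos) ++
                 PySem.Chars.slice name (some (r_pos + 1)) none
      cleanup_goA fuel res
    else name

def cleanup_name (name : String) : String :=
  String.ofList (cleanup_goA (name.toList.length + 1) name.toList)

-- ===== PORT B =====
def cleanup_goB (fuel : Nat) (name : List Char) : List Char :=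
  match fuel with
  | 0 => name
  | fuel + 1 =>
    let l := PySem.Chars.find name ['{']
    let r := PySem.Chars.find name ['}']
    if l = -1 ∨ r = -1 ∨ r ≤ l then name
    else
      let kc :=
        if PySem.Chars.pyGet? name (l + 1) = some '\\' then
          let sp := PySem.Chars.findFrom name [' '] l none
          if l ≠ 0 then (l - 1, sp) else ((0 : Int), sp + 1)
        else
          let p := PySem.Chars.rfindFrom name ['\\'] 0 (some l)
          if p ≠ -1 then (p, l + 1)
          else if l ≠ 0 then (l - 1, l + 1)
          else ((0 : Int), l + 2)
      cleanup_goB fuel (PySem.Chars.slice name none (some kc.1) ++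
                        PySem.Chars.slice name (some kc.2) (some r) ++
                        PySem.Chars.slice name (some (r + 1)) none)

def cleanup_name_alt (name : String) : String :=
  String.ofList (cleanup_goB (name.toList.length + 1) name.toList)

-- ===== PRECONDITION & SPEC =====
def Spec_cleanup_name (name : String) (out : String) : Prop := out = cleanup_name_alt name
instance (name : String) (out : String) : Decidable (Spec_cleanup_name name out) := by unfold Spec_cleanup_name; infer_instance

-- ===== CLAIM (what is proved, stated in full; the proofs are below) =====
def Claim_equal_cleanup_name : Prop := ∀ (name : String), Dom_cleanup_name name → Spec_cleanup_name name (cleanup_name name)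

-- ===== LEMMAS AND PROOFS =====

-- a one-character list is a prefix of xs iff xs starts with that character
theorem singleton_prefix (c : Char) (xs : List Char) : [c] <+: xs ↔ xs[0]? = some c := by
  cases xs with
  | nil => simp
  | cons h t => simp [List.cons_prefix_cons, eq_comm]

theorem rfind_go_ge (s sub : List Char) (j : Nat) : -1 ≤ PySem.Chars.rfind.go s sub j := by
  induction j with
  | zero => simp only [PySem.Chars.rfind.go]; split <;> omega
  | succ p ih => simp only [PySem.Chars.rfind.go]; split <;> omega

-- A's backward scan equals rfind.go with the '+1 if found' adjustment
theorem scanA_eq_rfind_go (s : List Char) (l : Int) (j : Nat) :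
    cleanup_scanA s l j =
      (if PySem.Chars.rfind.go s ['\\'] j = -1 then l else PySem.Chars.rfind.go s ['\\'] j + 1) := by
  induction j with
  | zero =>
    by_cases h : s[0]? = some '\\' <;>
      simp [cleanup_scanA, PySem.Chars.rfind.go, PySem.Chars.pyGet?_eq_listPyGet?,
            PySem.List.pyGet?_zero, singleton_prefix, h]
  | succ p ih =>
    have hd : (['\\'].isPrefixOf (List.drop (p + 1) s) = true) ↔ s[p + 1]? = some '\\' := by
      simp [singleton_prefix, List.getElem?_drop]
    simp only [cleanup_scanA, PySem.Chars.rfind.go, PySem.Chars.pyGet?_eq_listPyGet?,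
               PySem.List.pyGet?_natCast]
    by_cases h : s[p + 1]? = some '\\'
    · rw [if_pos h, if_pos (hd.mpr h), if_neg (by omega : ¬ (((p + 1 : Nat) : Int)) = -1)]
      omega
    · rw [if_neg h, if_neg (fun hc => h (hd.mp hc))]
      exact ih

theorem rfind_go_take (s : List Char) (c : Char) (lN j : Nat) (hj : j < lN) :
    PySem.Chars.rfind.go (s.take lN) [c] j = PySem.Chars.rfind.go s [c] j := by
  induction j with
  | zero =>
    have h0 : (s.take lN)[0]? = s[0]? := List.getElem?_take_of_lt (by omega)
    simp [PySem.Chars.rfind.go, singleton_prefix, h0]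
  | succ p ih =>
    have h1 : (s.take lN)[p + 1]? = s[p + 1]? := List.getElem?_take_of_lt (by omega)
    simp [PySem.Chars.rfind.go, singleton_prefix, List.getElem?_drop, h1, ih (by omega)]

-- rfind on the l-prefix equals rfind.go on s started at l, when s[l] is '{' (not '\')
theorem rfind_take_eq (s : List Char) (lN : Nat) (hl : s[lN]? = some '{') :
    PySem.Chars.rfind (s.take lN) ['\\'] = PySem.Chars.rfind.go s ['\\'] lN := by
  have hlen : lN < s.length := by
    by_contra h
    simp [List.getElem?_eq_none (by omega : s.length <= lN)] at hl
  have htl : (s.take lN).length = lN := by simp; omega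
  have hne : s[lN]? ≠ some '\\' := by rw [hl]; intro hc; injection hc with hc; cases hc
  rw [PySem.Chars.rfind, htl]
  cases lN with
  | zero =>
    simp [PySem.Chars.rfind.go, singleton_prefix, hl]
  | succ p =>
    have h1 : (s.take (p + 1))[p + 1]? = none := by
      apply List.getElem?_eq_none; simp
    simp [PySem.Chars.rfind.go, singleton_prefix, List.getElem?_drop, hne,
          rfind_go_take s '\\' (p + 1) p (by omega)]

-- the two step bodies agree, hence the two fueled loops agree
theorem goA_eq_goB (fuel : Nat) (s : List Char) : cleanup_goA fuel s = cleanup_goB fuel s := by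
  induction fuel generalizing s with
  | zero => rfl
  | succ fuel ih =>
    simp only [cleanup_goA, cleanup_goB]
    set l := PySem.Chars.find s ['{'] with hldef
    set r := PySem.Chars.find s ['}'] with hrdef
    by_cases hg : l ≠ -1 ∧ r ≠ -1 ∧ l < r
    · obtain ⟨h1, h2, h3⟩ := hg
      rw [if_pos ⟨h1, h2, h3⟩, if_neg (by omega : ¬ (l = -1 ∨ r = -1 ∨ r ≤ l))]
      -- facts about l
      have hl0 : 0 ≤ l := by
        have := PySem.Chars.neg_one_le_find s ['{']
        rw [← hldef] at this; omega
      have hspec := PySem.Chars.find_spec (s := s) (sub := ['{']) (by rw [← hldef]; omega)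
      rw [← hldef] at hspec
      have hbrace : s[l.toNat]? = some '{' := by
        rcases hspec.1 with ⟨t, ht⟩
        have hh : (s.drop l.toNat).head? = some '{' := by rw [← ht]; rfl
        rwa [List.head?_drop] at hh
      rw [ih]
      congr 1
      by_cases hb : PySem.Chars.pyGet? s (l + 1) = some '\\'
      · -- command right after '{': both take the find(' ', l) route
        rw [if_pos hb, if_pos hb]
        by_cases hz : l = 0 <;>
          simp [hz, PySem.List.slice_zero_start, PySem.Chars.slice_eq_listSlice]
      · rw [if_neg hb, if_neg hb]
        -- evaluate B's rfindFrom on [0, l)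
        have hlen : l.toNat < s.length := by
          by_contra h
          simp [List.getElem?_eq_none (by omega : s.length <= l.toNat)] at hbrace
        have hrf : PySem.Chars.rfindFrom s ['\\'] 0 (some l) =
            (if PySem.Chars.rfind.go s ['\\'] l.toNat = -1 then -1
             else PySem.Chars.rfind.go s ['\\'] l.toNat) := by
          simp only [PySem.Chars.rfindFrom]
          rw [if_neg (by omega : ¬ ((s.length : Int)) < l), if_neg (by omega : ¬ l < 0),
              if_neg (by omega : ¬ ((0 : Int)) < 0), if_neg (by omega : ¬ l < 0),
              Int.toNat_zero, List.drop_zero, rfind_take_eq s l.toNat hbrace]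
          split <;> simp
        set p := PySem.Chars.rfindFrom s ['\\'] 0 (some l)
        have hge := rfind_go_ge s ['\\'] l.toNat
        rw [scanA_eq_rfind_go]
        by_cases hfound : PySem.Chars.rfind.go s ['\\'] l.toNat = -1
        · -- no backslash before '{'
          have hp : p = -1 := by rw [hrf, if_pos hfound]
          rw [if_pos hfound, hp]
          by_cases hz : l = 0 <;>
            simp [hz, PySem.List.slice_zero_start, PySem.Chars.slice_eq_listSlice]
        · have hp : p = PySem.Chars.rfind.go s ['\\'] l.toNat := by
            rw [hrf, if_neg hfound]
          have hp0 : 0 ≤ p := by rw [hp]; omega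
          rw [if_neg hfound, ← hp,
              if_pos (by omega : p + 1 ≠ 0), if_pos (by omega : p ≠ -1)]
          have hpp : p + 1 - 1 = p := by omega
          rw [hpp]
          simp [PySem.List.slice_zero_start, PySem.Chars.slice_eq_listSlice]
    · rw [if_neg hg, if_pos (by omega : l = -1 ∨ r = -1 ∨ r ≤ l)]

-- ===== VERDICT (by name: the statement is the Claim_ definition above) =====
theorem cleanup_name_spec : Claim_equal_cleanup_name := by
  intro name _
  unfold Spec_cleanup_name cleanup_name cleanup_name_alt
  rw [goA_eq_goB]
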